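-- pv_equiv track=rewrite | github.com/RickGriff/domain-generator | domain_generator.py | gen_domains
-- ===== SOURCE A (Python) =====
-- def combine_two(list_1, list_2):
--     domains = []
--     for i in list_1:
--         for j in list_2:
--             if len(i) > 0 and len(j) > 0:
--                 domain = i.strip() + j.strip() + ".com"
--                 domains.append(domain)
--     return domains
--
-- def gen_domains(col_a, col_b):
--     col_1 = col_a[:]
--     col_2 = col_b[:]
--
--     title_1 = col_1.pop(0)
--     title_2 = col_2.pop(0)
--
--     domains_title = "{}+{}".format(title_1, title_2)
--     domains = combine_two(col_1, col_2)
--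
--     domains_rows = [domains[i:i+8] for i in range(0, len(domains), 8)] # Convert to array of 8-column rows
--     domains_rows.insert(0, [domains_title])
--     domains_rows.append([""] * 8) # append an empty row after data
--
--     return domains_rows
-- ===== SOURCE B (Python) =====
-- def gen_domains(col_a, col_b):
--     # One pass: build each 8-wide row directly with a buffer instead of
--     # building a flat list and re-slicing it afterwards.
--     rows = [["{}+{}".format(col_a[0], col_b[0])]]
--     current = []
--     for i in col_a[1:]:
--         if len(i) == 0:
--             continue
--         si = i.strip()
--         for j in col_b[1:]:
--             if len(j) > 0:
--                 current.append(si + j.strip() + ".com")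
--                 if len(current) == 8:
--                     rows.append(current)
--                     current = []
--     if current:
--         rows.append(current)
--     rows.append([""] * 8)
--     return rows
-- ===== Notes on version B (the rewrite author's own statement) =====
-- stated objective: alternative
-- what changed: B emits the 8-wide rows in a single pass with a row buffer that is flushed at length 8 (hoisting the per-row strip and the empty-string filter on the first column out of the inner loop), instead of A's build-a-flat-list-then-reslice-with-range/slice two-phase approach.
import Mathlib
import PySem

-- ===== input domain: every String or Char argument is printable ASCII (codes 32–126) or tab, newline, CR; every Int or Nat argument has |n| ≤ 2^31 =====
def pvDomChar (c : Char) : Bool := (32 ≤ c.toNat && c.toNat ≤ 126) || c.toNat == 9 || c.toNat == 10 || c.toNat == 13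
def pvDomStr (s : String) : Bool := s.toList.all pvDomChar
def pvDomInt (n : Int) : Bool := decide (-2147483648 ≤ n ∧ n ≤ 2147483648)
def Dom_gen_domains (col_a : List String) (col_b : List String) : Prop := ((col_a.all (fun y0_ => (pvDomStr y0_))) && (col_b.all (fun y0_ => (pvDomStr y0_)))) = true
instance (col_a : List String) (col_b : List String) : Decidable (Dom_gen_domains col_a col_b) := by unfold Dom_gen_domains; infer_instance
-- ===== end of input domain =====

-- B builds the 8-wide rows in one pass with a row buffer instead of building a
-- flat list and re-slicing it; same return value, no claimed speed difference.

-- ===== PORT A =====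
def combine_two (list_1 : List String) (list_2 : List String) : List String :=
  list_1.foldl (fun domains i =>
    list_2.foldl (fun domains j =>
      if 0 < PySem.Str.len i ∧ 0 < PySem.Str.len j then
        domains ++ [PySem.Str.strip i ++ PySem.Str.strip j ++ ".com"]
      else domains) domains) []

def gen_domains (col_a : List String) (col_b : List String) : List (List String) :=
  match col_a, col_b with
  | title_1 :: col_1, title_2 :: col_2 =>
    let domains_title := title_1 ++ "+" ++ title_2
    let domains := combine_two col_1 col_2
    let domains_rows := (PySem.List.pyRange 0 (PySem.List.len domains) 8).map
        (fun i => PySem.List.slice domains (some i) (some (i + 8)))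
    [domains_title] :: (domains_rows ++ [List.replicate 8 ""])
  | _, _ => []  -- col_a or col_b empty: Python raises IndexError on pop(0); outside Pre_

-- ===== PORT B =====
def bStep (st : List (List String) × List String) (d : String) :
    List (List String) × List String :=
  let cur := st.2 ++ [d]
  if cur.length = 8 then (st.1 ++ [cur], []) else (st.1, cur)

def gen_domains_alt (col_a : List String) (col_b : List String) : List (List String) :=
  match col_a with
  | [] => []
  | t1 :: c1 =>
  match col_b with
  | [] => []
  | t2 :: c2 =>
    let st := c1.foldl (fun st i =>
      if PySem.Str.len i = 0 then st else
      let si := PySem.Str.strip i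
      c2.foldl (fun st j =>
        if 0 < PySem.Str.len j then bStep st (si ++ PySem.Str.strip j ++ ".com") else st) st)
      ([[t1 ++ "+" ++ t2]], [])
    (if st.2 = [] then st.1 else st.1 ++ [st.2]) ++ [List.replicate 8 ""]

-- ===== PRECONDITION & SPEC =====
-- Pre_ excludes exactly the inputs where Python A raises IndexError: an empty
-- col_a or col_b makes `pop(0)` fail.
def Pre_gen_domains (col_a : List String) (col_b : List String) : Prop :=
  col_a ≠ [] ∧ col_b ≠ []
instance (col_a : List String) (col_b : List String) : Decidable (Pre_gen_domains col_a col_b) := by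
  unfold Pre_gen_domains; infer_instance

def pvWitness_gen_domains : List String × List String :=
  (["A", "foo", " bar "], ["B", "baz", ""])

def Spec_gen_domains (col_a : List String) (col_b : List String) (out : List (List String)) : Prop :=
  out = gen_domains_alt col_a col_b
instance (col_a : List String) (col_b : List String) (out : List (List String)) : Decidable (Spec_gen_domains col_a col_b out) := by unfold Spec_gen_domains; infer_instance

-- ===== CLAIM (what is proved, stated in full; the proofs are below) =====
def Claim_equal_gen_domains : Prop := ∀ (col_a : List String) (col_b : List String), Dom_gen_domains col_a col_b → Pre_gen_domains col_a col_b → Spec_gen_domains col_a col_b (gen_domains col_a col_b)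

-- ===== LEMMAS AND PROOFS =====

-- proof-only helpers: structural chunking views of a flat list
def chunks {α : Type} (l : List α) : List (List α) :=
  if h : l = [] then [] else l.take 8 :: chunks (l.drop 8)
termination_by l.length
decreasing_by
  have : 0 < l.length := List.length_pos_of_ne_nil h
  simp
  omega

def chunksF {α : Type} (l : List α) : List (List α) :=
  if 8 ≤ l.length then l.take 8 :: chunksF (l.drop 8) else []
termination_by l.length
decreasing_by simp; omega

def chunksP {α : Type} (l : List α) : List α :=
  if 8 ≤ l.length then chunksP (l.drop 8) else l
termination_by l.length
decreasing_by simp; omega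

-- the flat list A builds (and that B consumes item by item)
def flatDoms (c1 c2 : List String) : List String :=
  c1.flatMap (fun i =>
    (c2.filter (fun j => decide (0 < PySem.Str.len i ∧ 0 < PySem.Str.len j))).map
      (fun j => PySem.Str.strip i ++ PySem.Str.strip j ++ ".com"))

lemma combine_two_eq_flat (c1 c2 : List String) : combine_two c1 c2 = flatDoms c1 c2 := by
  unfold combine_two flatDoms
  calc c1.foldl (fun domains i =>
        c2.foldl (fun domains j =>
          if 0 < PySem.Str.len i ∧ 0 < PySem.Str.len j then
            domains ++ [PySem.Str.strip i ++ PySem.Str.strip j ++ ".com"]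
          else domains) domains) []
      = c1.foldl (fun domains i => domains ++
          (c2.filter (fun j => decide (0 < PySem.Str.len i ∧ 0 < PySem.Str.len j))).map
            (fun j => PySem.Str.strip i ++ PySem.Str.strip j ++ ".com")) [] := by
        exact List.foldl_ext _ _ []
          (by intro acc i _; exact PySem.List.foldl_append_ite _ _ _ _)
    _ = _ := by
        rw [PySem.List.foldl_append_eq_flatMap]; simp

-- A's slicing comprehension computes `chunks`
lemma range_chunks {α : Type} : ∀ (n : Nat) (l : List α), l.length ≤ n →
    (List.range (if 0 < (l.length : Int) then (((l.length : Int) + 7) / 8).toNat else 0)).map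
      (fun k => (l.drop (8 * k)).take 8) = chunks l := by
  intro n
  induction n with
  | zero =>
    intro l hl
    have : l = [] := List.eq_nil_of_length_eq_zero (Nat.le_zero.mp hl)
    subst this
    simp [chunks]
  | succ n ih =>
    intro l hl
    rcases eq_or_ne l [] with rfl | hne
    · simp [chunks]
    · have hpos : 0 < l.length := List.length_pos_of_ne_nil hne
      have hd : (l.drop 8).length = l.length - 8 := by simp
      have hcnt : (((l.length : Int) + 7) / 8).toNat
          = (if 0 < (((l.drop 8).length : Int)) then ((((l.drop 8).length : Int) + 7) / 8).toNat else 0) + 1 := by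
        rw [hd]
        by_cases h : l.length ≤ 8
        · have h0 : l.length - 8 = 0 := by omega
          rw [h0]
          norm_num
          omega
        · have hc : ((l.length - 8 : Nat) : Int) = (l.length : Int) - 8 := by omega
          rw [hc, if_pos (by omega)]
          omega
      rw [if_pos (by exact_mod_cast hpos), hcnt, List.range_succ_eq_map, List.map_cons,
          List.map_map, chunks, dif_neg hne]
      have h0 : (l.drop (8 * 0)).take 8 = l.take 8 := by simp
      have htail : (List.range (if 0 < (((l.drop 8).length : Int)) then ((((l.drop 8).length : Int) + 7) / 8).toNat else 0)).map
          ((fun k => (l.drop (8 * k)).take 8) ∘ Nat.succ) = chunks (l.drop 8) := by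
        rw [← ih (l.drop 8) (by omega)]
        apply List.map_congr_left
        intro k _
        simp only [Function.comp_apply, List.drop_drop, Nat.succ_eq_add_one]
        have : 8 * (k + 1) = 8 + 8 * k := by ring
        rw [this]
      rw [h0, htail]

lemma slice_rows_eq_chunks (l : List String) :
    (PySem.List.pyRange 0 (PySem.List.len l) 8).map
      (fun i => PySem.List.slice l (some i) (some (i + 8))) = chunks l := by
  rw [show PySem.List.len l = (l.length : Int) from PySem.List.len_eq l]
  rw [PySem.List.pyRange_of_pos 0 (l.length : Int) (by norm_num)]
  rw [List.map_map]
  rw [show ((l.length : Int) - 0 + 8 - 1) = (l.length : Int) + 7 by ring]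
  have key : ∀ k : Nat,
      PySem.List.slice l (some (0 + 8 * (k : Int))) (some (0 + 8 * (k : Int) + 8))
      = (l.drop (8 * k)).take 8 := by
    intro k
    have h8k : (0 + 8 * (k : Int)) = ((8 * k : Nat) : Int) := by push_cast; ring
    rw [show (0 + 8 * (k : Int) + 8) = ((8 * k : Nat) : Int) + ((8 : Nat) : Int) by push_cast; ring,
        h8k, PySem.List.slice_natCast_add]
  refine Eq.trans (List.map_congr_left ?_) (range_chunks l.length l le_rfl)
  intro k _
  exact key k

-- chunks splits into the full rows and the trailing partial row
lemma chunks_eq_F_P {α : Type} : ∀ (n : Nat) (l : List α), l.length ≤ n →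
    chunks l = chunksF l ++ (if chunksP l = [] then [] else [chunksP l]) := by
  intro n
  induction n with
  | zero =>
    intro l hl
    have : l = [] := List.eq_nil_of_length_eq_zero (Nat.le_zero.mp hl)
    subst this
    simp [chunks, chunksF, chunksP]
  | succ n ih =>
    intro l hl
    rcases eq_or_ne l [] with rfl | hne
    · simp [chunks, chunksF, chunksP]
    · by_cases h8 : 8 ≤ l.length
      · rw [chunks, dif_neg hne, chunksF, if_pos h8, chunksP, if_pos h8]
        rw [ih (l.drop 8) (by simp; omega)]
        simp
      · have hlt : l.length < 8 := Nat.lt_of_not_le h8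
        rw [chunks, dif_neg hne, chunksF, if_neg h8, chunksP, if_neg h8]
        have hdrop : l.drop 8 = [] := List.drop_eq_nil_of_le (by omega)
        rw [hdrop, List.take_of_length_le (by omega)]
        simp [chunks, hne]

-- feeding a flat list into B's buffer step, one item at a time
lemma feed_eq : ∀ (l : List String) (rows : List (List String)) (cur : List String),
    cur.length < 8 →
    l.foldl bStep (rows, cur) = (rows ++ chunksF (cur ++ l), chunksP (cur ++ l)) := by
  intro l
  induction l with
  | nil =>
    intro rows cur hcur
    simp only [List.foldl_nil, List.append_nil]
    rw [chunksF, if_neg (by omega), chunksP, if_neg (by omega)]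
    simp
  | cons d l' ih =>
    intro rows cur hcur
    simp only [List.foldl_cons]
    have hsplit : cur ++ d :: l' = (cur ++ [d]) ++ l' := by simp
    by_cases h8 : (cur ++ [d]).length = 8
    · have hb : bStep (rows, cur) d = (rows ++ [cur ++ [d]], []) := by
        simp only [bStep]
        rw [if_pos h8]
      rw [hb, ih _ _ (by simp), hsplit]
      have hF : chunksF ((cur ++ [d]) ++ l') = (cur ++ [d]) :: chunksF l' := by
        rw [chunksF, if_pos (by simp only [List.length_append] at h8 ⊢; omega)]
        rw [List.take_left' h8, List.drop_left' h8]
      have hP : chunksP ((cur ++ [d]) ++ l') = chunksP l' := by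
        rw [chunksP, if_pos (by simp only [List.length_append] at h8 ⊢; omega), List.drop_left' h8]
      rw [hF, hP]
      simp [List.append_assoc]
    · have hb : bStep (rows, cur) d = (rows, cur ++ [d]) := by
        simp only [bStep]
        rw [if_neg h8]
      have hlen : (cur ++ [d]).length < 8 := by
        simp only [List.length_append, List.length_singleton] at *
        omega
      rw [hb, ih _ _ hlen, hsplit]

-- B's nested loops consume exactly the flat list
lemma foldl_filter_map {α β σ : Type} (g : σ → β → σ) (p : α → Prop) [DecidablePred p]
    (f : α → β) : ∀ (l : List α) (st : σ),
    l.foldl (fun st x => if p x then g st (f x) else st) st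
      = ((l.filter (fun x => decide (p x))).map f).foldl g st := by
  intro l
  induction l with
  | nil => intro st; simp
  | cons x l' ih =>
    intro st
    rcases Decidable.em (p x) with hx | hx
    · rw [List.foldl_cons, if_pos hx, List.filter_cons, if_pos (by simp [hx]),
          List.map_cons, List.foldl_cons]
      exact ih _
    · rw [List.foldl_cons, if_neg hx, List.filter_cons, if_neg (by simp [hx])]
      exact ih _

lemma bfold_eq (c2 : List String) : ∀ (c1 : List String) (st : List (List String) × List String),
    c1.foldl (fun st i =>
      if PySem.Str.len i = 0 then st else
      c2.foldl (fun st j =>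
        if 0 < PySem.Str.len j then
          bStep st (PySem.Str.strip i ++ PySem.Str.strip j ++ ".com")
        else st) st) st
    = (flatDoms c1 c2).foldl bStep st := by
  intro c1
  induction c1 with
  | nil => intro st; simp [flatDoms]
  | cons i c1' ih =>
    intro st
    have hflat : flatDoms (i :: c1') c2 =
        ((c2.filter (fun j => decide (0 < PySem.Str.len i ∧ 0 < PySem.Str.len j))).map
          (fun j => PySem.Str.strip i ++ PySem.Str.strip j ++ ".com")) ++ flatDoms c1' c2 := by
      simp [flatDoms]
    rw [hflat, List.foldl_append, List.foldl_cons, ← ih]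
    congr 1
    by_cases hi : PySem.Str.len i = 0
    · rw [if_pos hi]
      have : c2.filter (fun j => decide (0 < PySem.Str.len i ∧ 0 < PySem.Str.len j)) = [] := by
        apply List.filter_eq_nil_iff.mpr
        intro j _
        have hi' : i.length = 0 := by
          rw [PySem.Str.len_eq] at hi
          exact_mod_cast hi
        simp [hi']
      rw [this]
      simp
    · rw [if_neg hi]
      have hipos : 0 < PySem.Str.len i := by
        have := PySem.Str.len_eq i
        omega
      have hfilt : c2.filter (fun j => decide (0 < PySem.Str.len i ∧ 0 < PySem.Str.len j))
          = c2.filter (fun j => decide (0 < PySem.Str.len j)) := by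
        apply List.filter_congr
        intro j _
        simp only [decide_eq_decide]
        exact ⟨fun h => h.2, fun h => ⟨hipos, h⟩⟩
      rw [hfilt]
      exact foldl_filter_map bStep (fun j => 0 < PySem.Str.len j)
        (fun j => PySem.Str.strip i ++ PySem.Str.strip j ++ ".com") c2 st

-- ===== VERDICT (by name: the statement is the Claim_ definition above) =====
theorem gen_domains_spec : Claim_equal_gen_domains := by
  intro col_a col_b _ hpre
  obtain ⟨ha, hb⟩ := hpre
  match col_a, col_b with
  | [], _ => exact absurd rfl ha
  | _ :: _, [] => exact absurd rfl hb
  | t1 :: c1, t2 :: c2 =>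
    show gen_domains (t1 :: c1) (t2 :: c2) = gen_domains_alt (t1 :: c1) (t2 :: c2)
    simp only [gen_domains, gen_domains_alt]
    rw [combine_two_eq_flat, slice_rows_eq_chunks]
    rw [bfold_eq c2 c1 ([[t1 ++ "+" ++ t2]], [])]
    rw [feed_eq (flatDoms c1 c2) [[t1 ++ "+" ++ t2]] [] (by simp)]
    rw [chunks_eq_F_P (flatDoms c1 c2).length (flatDoms c1 c2) le_rfl]
    simp only [List.nil_append]
    by_cases hP : chunksP (flatDoms c1 c2) = []
    · rw [if_pos hP, if_pos hP]
      simp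
    · rw [if_neg hP, if_neg hP]
      simp
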